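-- pv_equiv track=rewrite | github.com/temur-kh/TCS | Assignment1/fsa_validator.py | __has_disjoint_states
-- ===== SOURCE A (Python) =====
-- def __dfs(cur, path, visited):
--     """
--     Depth-first search in a graph
--     :param cur: a current node in the graph
--     :param path: a dictionary of transitions in the graph
--     :param visited: a dictionary of boolean variables to check visits to the nodes
--     :return: 0
--     """
--     for state in path[cur]:
--         if not visited[state]:
--             visited[state] = True
--             __dfs(state, path, visited)
--     pass
--
-- def __has_disjoint_states(states, trans):
--     """
--     Check if the FSA has disjoint states using counting of graph components
--     :param trans: a list of transitions of the form tuple(s1>a>s2) where s1 and s2 are states, and a is an alpha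
--     :return: True if the FSA has disjoint states else False
--     """
--     cnt_components = 0
--     path = {state: set() for state in states}
--     visited = {state: False for state in states}
--     for tup in trans:
--         path[tup[0]].add(tup[2])
--         path[tup[2]].add(tup[0])
--     for state in path.keys():
--         if not visited[state]:
--             visited[state] = True
--             __dfs(state, path, visited)
--             cnt_components += 1
--     return cnt_components > 1
-- ===== SOURCE B (Python) =====
-- def __has_disjoint_states(states, trans):
--     """
--     Check if the FSA has disjoint states by label-propagation flooding over the
--     transition list directly (no adjacency dict, no recursion).
--     """
--     visited = {state: False for state in states}
--     cnt_components = 0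
--     for state in list(visited):
--         if not visited[state]:
--             visited[state] = True
--             changed = True
--             while changed:
--                 changed = False
--                 for tup in trans:
--                     if visited[tup[0]] != visited[tup[2]]:
--                         visited[tup[0]] = True
--                         visited[tup[2]] = True
--                         changed = True
--             cnt_components += 1
--     return cnt_components > 1
-- ===== Notes on version B (the rewrite author's own statement) =====
-- stated objective: alternative
-- what changed: Replaces A's recursive DFS over an explicitly built symmetric adjacency dict of sets by an iterative label-propagation flooding that repeatedly sweeps the raw transition list until a fixpoint, so B builds no adjacency structure and uses no recursion.
import Mathlib
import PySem

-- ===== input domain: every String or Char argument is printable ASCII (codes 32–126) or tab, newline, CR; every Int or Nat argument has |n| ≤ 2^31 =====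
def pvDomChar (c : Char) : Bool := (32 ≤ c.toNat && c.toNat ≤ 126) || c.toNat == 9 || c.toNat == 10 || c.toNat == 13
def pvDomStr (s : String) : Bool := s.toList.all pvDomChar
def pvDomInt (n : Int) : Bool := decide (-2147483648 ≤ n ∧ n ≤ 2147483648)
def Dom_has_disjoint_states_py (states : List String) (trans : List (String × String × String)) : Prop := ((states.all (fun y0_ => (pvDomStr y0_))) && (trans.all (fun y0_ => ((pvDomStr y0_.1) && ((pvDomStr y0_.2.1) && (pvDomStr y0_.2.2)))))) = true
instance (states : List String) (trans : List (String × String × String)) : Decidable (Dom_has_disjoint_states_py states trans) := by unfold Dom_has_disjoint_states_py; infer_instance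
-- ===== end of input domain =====

-- B replaces A's recursive DFS over an adjacency dict by an iterative label-propagation
-- fixpoint over the raw transition list (no adjacency structure, no recursion); alternative
-- algorithm, no speed claim.

-- ===== PORT A =====
-- path = {state: set() for state in states}; for tup in trans: path[tup[0]].add(tup[2]); path[tup[2]].add(tup[0])
-- (Python raises KeyError when an endpoint is not a key; inside Pre_ every endpoint is a key,
--  so the getD/insert totalisation below agrees with Python there.)
def pvBuildPath (states : List String) (trans : List (String × String × String)) :
    PySem.Dict String (PySem.Set String) :=
  let init := states.foldl (fun d s => d.insert s ([] : PySem.Set String)) PySem.Dict.empty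
  trans.foldl (fun d tup =>
    let d1 := d.insert tup.1 (PySem.Set.add (d.getD tup.1 []) tup.2.2)
    d1.insert tup.2.2 (PySem.Set.add (d1.getD tup.2.2 []) tup.1)) init

-- __dfs(cur, path, visited); recursion made total with a fuel guard (the top-level call
-- passes path.keys.length, enough fuel since every recursive call first marks a fresh key).
def pvDfsA : Nat → PySem.Dict String (PySem.Set String) → String → PySem.Dict String Bool →
    PySem.Dict String Bool
  | 0, _, _, vis => vis
  | fuel+1, path, cur, vis =>
      (path.getD cur []).foldl
        (fun v st =>
          if v.getD st false then v
          else pvDfsA fuel path st (v.insert st true)) vis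

def has_disjoint_states_py (states : List String) (trans : List (String × String × String)) : Bool :=
  let path := pvBuildPath states trans
  let visited := states.foldl (fun d s => d.insert s false) (PySem.Dict.empty : PySem.Dict String Bool)
  let r := path.keys.foldl
    (fun (p : Int × PySem.Dict String Bool) st =>
      if p.2.getD st false then p
      else (p.1 + 1, pvDfsA path.keys.length path st (p.2.insert st true)))
    (0, visited)
  decide (1 < r.1)

-- ===== PORT B =====
-- one pass of 'for tup in trans: if visited[tup[0]] != visited[tup[2]]: mark both; changed = True'
def pvSweepB (trans : List (String × String × String)) (v : PySem.Dict String Bool) :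
    PySem.Dict String Bool × Bool :=
  trans.foldl
    (fun p tup =>
      if p.1.getD tup.1 false != p.1.getD tup.2.2 false then
        ((p.1.insert tup.1 true).insert tup.2.2 true, true)
      else p)
    (v, false)

-- 'while changed:' made total with a fuel guard (each productive sweep marks a fresh key,
-- so states.length + 1 sweeps always reach the fixpoint inside Pre_).
def pvFloodB : Nat → List (String × String × String) → PySem.Dict String Bool →
    PySem.Dict String Bool
  | 0, _, v => v
  | fuel+1, tr, v =>
      let p := pvSweepB tr v
      if p.2 then pvFloodB fuel tr p.1 else p.1

def has_disjoint_states_py_alt (states : List String) (trans : List (String × String × String)) : Bool :=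
  let visited := states.foldl (fun d s => d.insert s false) (PySem.Dict.empty : PySem.Dict String Bool)
  let r := visited.keys.foldl
    (fun (p : Int × PySem.Dict String Bool) st =>
      if p.2.getD st false then p
      else (p.1 + 1, pvFloodB (states.length + 1) trans (p.2.insert st true)))
    (0, visited)
  decide (1 < r.1)

-- ===== PRECONDITION & SPEC =====
-- Pre_ excludes exactly the inputs on which Python A raises KeyError: a transition whose
-- source or target state is not in `states` (B raises KeyError there too).
def Pre_has_disjoint_states_py (states : List String) (trans : List (String × String × String)) : Prop :=
  ∀ t ∈ trans, t.1 ∈ states ∧ t.2.2 ∈ states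
instance (states : List String) (trans : List (String × String × String)) : Decidable (Pre_has_disjoint_states_py states trans) := by unfold Pre_has_disjoint_states_py; infer_instance

def pvWitness_has_disjoint_states_py : List String × (List (String × String × String)) :=
  (["a", "b", "c"], [("a", "x", "b")])

def Spec_has_disjoint_states_py (states : List String) (trans : List (String × String × String)) (out : Bool) : Prop := out = has_disjoint_states_py_alt states trans
instance (states : List String) (trans : List (String × String × String)) (out : Bool) : Decidable (Spec_has_disjoint_states_py states trans out) := by unfold Spec_has_disjoint_states_py; infer_instance

-- ===== CLAIM (what is proved, stated in full; the proofs are below) =====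
def Claim_equal_has_disjoint_states_py : Prop := ∀ (states : List String) (trans : List (String × String × String)), Dom_has_disjoint_states_py states trans → Pre_has_disjoint_states_py states trans → Spec_has_disjoint_states_py states trans (has_disjoint_states_py states trans)

-- ===== LEMMAS AND PROOFS =====

-- the visited set of a dict, the symmetric adjacency relations, reachability
def pvMark (v : PySem.Dict String Bool) (s : String) : Prop := v.getD s false = true

def pvAdj (trans : List (String × String × String)) (x y : String) : Prop :=
  ∃ t ∈ trans, (t.1 = x ∧ t.2.2 = y) ∨ (t.1 = y ∧ t.2.2 = x)

def pvN (path : PySem.Dict String (PySem.Set String)) (x y : String) : Prop :=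
  y ∈ path.getD x []

def pvMu (K : List String) (v : PySem.Dict String Bool) : Nat :=
  (K.filter (fun s => !v.getD s false)).length

-- ---- dict basics ----
theorem pvMark_insert_true (v : PySem.Dict String Bool) (a s : String) :
    pvMark (v.insert a true) s ↔ s = a ∨ pvMark v s := by
  unfold pvMark
  rw [PySem.Dict.getD_insert]
  by_cases h : s = a <;> simp [h]

theorem pvFoldFalse (states : List String) :
    ∀ (d : PySem.Dict String Bool), (∀ s, d.getD s false = false) →
      ∀ s, (states.foldl (fun d s => d.insert s false) d).getD s false = false := by
  induction states with
  | nil => intro d h s; simpa using h s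
  | cons a l ih =>
    intro d h s
    simp only [List.foldl_cons]
    refine ih _ (fun s => ?_) s
    rw [PySem.Dict.getD_insert]
    split
    · rfl
    · exact h s

theorem pvInitFalse (states : List String) (s : String) :
    pvMark (states.foldl (fun d s => d.insert s false) (PySem.Dict.empty : PySem.Dict String Bool)) s → False := by
  intro h
  unfold pvMark at h
  rw [pvFoldFalse states PySem.Dict.empty (fun s => by simp [pysem]) s] at h
  exact Bool.false_ne_true h

-- ---- mu lemmas ----
theorem pvMu_mono (K : List String) (v v' : PySem.Dict String Bool)
    (h : ∀ s, pvMark v s → pvMark v' s) : pvMu K v' ≤ pvMu K v := by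
  unfold pvMu
  rw [← List.countP_eq_length_filter, ← List.countP_eq_length_filter]
  refine List.countP_mono_left (fun a _ ha => ?_)
  simp only [Bool.not_eq_eq_eq_not, Bool.not_true] at ha ⊢
  by_contra hb
  have : pvMark v a := by
    unfold pvMark
    cases hc : v.getD a false
    · exact absurd hc hb
    · rfl
  have := h a this
  unfold pvMark at this
  rw [this] at ha
  cases ha

theorem pvMu_lt_of_mark (K : List String) (v : PySem.Dict String Bool) (st : String)
    (hst : st ∈ K) (hm : pvMark v st) : pvMu K v < K.length := by
  refine List.length_filter_lt_length_iff_exists.mpr ⟨st, hst, ?_⟩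
  unfold pvMark at hm
  simp [hm]

theorem pvMu_insert_lt (K : List String) (v : PySem.Dict String Bool) (st : String)
    (hst : st ∈ K) (hm : ¬ pvMark v st) : pvMu K (v.insert st true) < pvMu K v := by
  obtain ⟨l1, l2, rfl⟩ := List.mem_iff_append.mp hst
  have hv : v.getD st false = false := by
    cases hc : v.getD st false
    · rfl
    · exact absurd hc hm
  have hseg : ∀ (l : List String),
      (l.filter (fun s => !(if s = st then true else v.getD s false))).length ≤
      (l.filter (fun s => !v.getD s false)).length := by
    intro l
    rw [← List.countP_eq_length_filter, ← List.countP_eq_length_filter]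
    refine List.countP_mono_left (fun a _ ha => ?_)
    split at ha
    · cases ha
    · exact ha
  have h1 := hseg l1
  have h2 := hseg l2
  unfold pvMu
  simp only [List.filter_append, List.length_append, List.filter_cons,
    PySem.Dict.getD_insert, hv, Bool.not_true, Bool.not_false, if_true,
    Bool.false_eq_true, if_false, List.length_cons]
  omega

-- ---- path dict facts ----
theorem pvInitKeys (states : List String) {ν : Type} (x : ν) :
    (states.foldl (fun d s => d.insert s x) (PySem.Dict.empty : PySem.Dict String ν)).keys
      = PySem.Set.ofList states := by
  rw [PySem.Dict.keys_foldl_insert]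
  simp [pysem, PySem.Set.update_nil_left]

theorem pvTransFoldKeys (ts : List (String × String × String)) :
    ∀ (d : PySem.Dict String (PySem.Set String)),
      (∀ t ∈ ts, t.1 ∈ d.keys ∧ t.2.2 ∈ d.keys) →
      (ts.foldl (fun d tup =>
        let d1 := d.insert tup.1 (PySem.Set.add (d.getD tup.1 []) tup.2.2)
        d1.insert tup.2.2 (PySem.Set.add (d1.getD tup.2.2 []) tup.1)) d).keys = d.keys := by
  induction ts with
  | nil => intro d _; rfl
  | cons t ts ih =>
    intro d h
    obtain ⟨h1, h2⟩ := h t (List.mem_cons_self)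
    have c1 : d.contains t.1 = true := (PySem.Dict.contains_iff_mem_keys _ _).mpr h1
    have k1 : (d.insert t.1 (PySem.Set.add (d.getD t.1 []) t.2.2)).keys = d.keys :=
      PySem.Dict.keys_insert_of_contains _ _ c1
    have c2 : (d.insert t.1 (PySem.Set.add (d.getD t.1 []) t.2.2)).contains t.2.2 = true := by
      refine (PySem.Dict.contains_iff_mem_keys _ _).mpr ?_
      rw [k1]; exact h2
    have k2 : ((d.insert t.1 (PySem.Set.add (d.getD t.1 []) t.2.2)).insert t.2.2
        (PySem.Set.add ((d.insert t.1 (PySem.Set.add (d.getD t.1 []) t.2.2)).getD t.2.2 []) t.1)).keys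
        = d.keys := by
      rw [PySem.Dict.keys_insert_of_contains _ _ c2, k1]
    simp only [List.foldl_cons]
    rw [ih _ (fun u hu => by rw [k2]; exact h u (List.mem_cons_of_mem _ hu)), k2]

theorem pvBuildPath_keys (states : List String) (trans : List (String × String × String))
    (hpre : Pre_has_disjoint_states_py states trans) :
    (pvBuildPath states trans).keys = PySem.Set.ofList states := by
  unfold pvBuildPath
  rw [pvTransFoldKeys trans _ (fun t ht => by
    rw [pvInitKeys]
    exact ⟨(PySem.Set.mem_ofList _ _).mpr (hpre t ht).1, (PySem.Set.mem_ofList _ _).mpr (hpre t ht).2⟩)]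
  exact pvInitKeys states []

theorem pvInitEmptySet (states : List String) :
    ∀ (d : PySem.Dict String (PySem.Set String)), (∀ s, d.getD s [] = []) →
      ∀ s, (states.foldl (fun d s => d.insert s ([] : PySem.Set String)) d).getD s [] = [] := by
  induction states with
  | nil => intro d h s; simpa using h s
  | cons a l ih =>
    intro d h s
    simp only [List.foldl_cons]
    refine ih _ (fun s => ?_) s
    rw [PySem.Dict.getD_insert]
    split
    · rfl
    · exact h s

theorem pvTransFoldMem (ts : List (String × String × String)) :
    ∀ (d : PySem.Dict String (PySem.Set String)) (Q : String → String → Prop),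
      (∀ x y, y ∈ d.getD x [] ↔ Q x y) →
      ∀ x y, y ∈ (ts.foldl (fun d tup =>
        let d1 := d.insert tup.1 (PySem.Set.add (d.getD tup.1 []) tup.2.2)
        d1.insert tup.2.2 (PySem.Set.add (d1.getD tup.2.2 []) tup.1)) d).getD x []
        ↔ (Q x y ∨ pvAdj ts x y) := by
  induction ts with
  | nil =>
    intro d Q h x y
    simp only [List.foldl_nil, pvAdj, List.not_mem_nil]
    rw [h x y]
    simp
  | cons t ts ih =>
    intro d Q h x y
    simp only [List.foldl_cons]
    rw [ih _ (fun x y => Q x y ∨ ((t.1 = x ∧ t.2.2 = y) ∨ (t.1 = y ∧ t.2.2 = x))) ?_ x y]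
    · constructor
      · rintro ((hq | he) | ha)
        · exact Or.inl hq
        · exact Or.inr ⟨t, List.mem_cons_self, he⟩
        · obtain ⟨u, hu, he⟩ := ha
          exact Or.inr ⟨u, List.mem_cons_of_mem _ hu, he⟩
      · rintro (hq | ⟨u, hu, he⟩)
        · exact Or.inl (Or.inl hq)
        · rcases List.mem_cons.mp hu with rfl | hu
          · exact Or.inl (Or.inr he)
          · exact Or.inr ⟨u, hu, he⟩
    · intro a b
      simp only [PySem.Dict.getD_insert]
      split_ifs with h2 h1 h1 <;> subst_vars <;> aesop

theorem pvN_iff_adj (states : List String) (trans : List (String × String × String)) (x y : String) :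
    pvN (pvBuildPath states trans) x y ↔ pvAdj trans x y := by
  unfold pvN pvBuildPath
  rw [pvTransFoldMem trans _ (fun _ _ => False) (fun a b => by
    rw [pvInitEmptySet states PySem.Dict.empty (fun s => by simp [pysem]) a]
    simp) x y]
  simp

-- ---- DFS (port A) ----
theorem pvDfsFold_mono (n : Nat) (path : PySem.Dict String (PySem.Set String))
    (hmono : ∀ cur vis s, pvMark vis s → pvMark (pvDfsA n path cur vis) s)
    (l : List String) :
    ∀ (vis : PySem.Dict String Bool) (s : String), pvMark vis s →
      pvMark (l.foldl (fun v st => if v.getD st false then v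
        else pvDfsA n path st (v.insert st true)) vis) s := by
  induction l with
  | nil => intro vis s h; exact h
  | cons a l ih =>
    intro vis s h
    simp only [List.foldl_cons]
    split
    · exact ih vis s h
    · refine ih _ s (hmono a _ s ?_)
      rw [pvMark_insert_true]
      exact Or.inr h

theorem pvDfsA_mono (fuel : Nat) (path : PySem.Dict String (PySem.Set String))
    (cur : String) (vis : PySem.Dict String Bool) (s : String)
    (h : pvMark vis s) : pvMark (pvDfsA fuel path cur vis) s := by
  induction fuel generalizing cur vis s with
  | zero => exact h
  | succ n ih =>
    simp only [pvDfsA]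
    exact pvDfsFold_mono n path (fun c v s h => ih c v s h) _ vis s h

theorem pvDfsA_sound (P : String → Prop)
    (path : PySem.Dict String (PySem.Set String))
    (hP : ∀ a b, P a → pvN path a b → P b)
    (fuel : Nat) (cur : String) (vis : PySem.Dict String Bool)
    (hvis : ∀ s, pvMark vis s → P s) (hcur : P cur)
    (s : String) (h : pvMark (pvDfsA fuel path cur vis) s) : P s := by
  induction fuel generalizing cur vis s with
  | zero => exact hvis s h
  | succ n ih =>
    simp only [pvDfsA] at h
    have hl : ∀ x ∈ path.getD cur ([] : PySem.Set String), pvN path cur x := fun x hx => hx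
    revert h
    generalize path.getD cur ([] : PySem.Set String) = l at hl
    induction l generalizing vis with
    | nil => exact fun h => hvis s h
    | cons a l ihl =>
      intro h
      simp only [List.foldl_cons] at h
      split at h
      · exact ihl vis hvis (fun x hx => hl x (List.mem_cons_of_mem _ hx)) h
      · have hPa : P a := hP cur a hcur (hl a List.mem_cons_self)
        refine ihl _ (fun u hu => ?_) (fun x hx => hl x (List.mem_cons_of_mem _ hx)) h
        refine ih a (vis.insert a true) (fun w hw => ?_) hPa u hu
        rw [pvMark_insert_true] at hw
        rcases hw with rfl | hw
        · exact hPa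
        · exact hvis w hw

theorem pvDfsA_nbrs (fuel : Nat) (path : PySem.Dict String (PySem.Set String))
    (cur : String) (vis : PySem.Dict String Bool) (hf : 0 < fuel)
    (y : String) (hy : pvN path cur y) : pvMark (pvDfsA fuel path cur vis) y := by
  obtain ⟨n, rfl⟩ : ∃ n, fuel = n + 1 := ⟨fuel - 1, by omega⟩
  simp only [pvDfsA]
  unfold pvN at hy
  revert hy
  generalize path.getD cur ([] : PySem.Set String) = l
  induction l generalizing vis with
  | nil => intro hy; cases hy
  | cons a l ihl =>
    intro hy
    simp only [List.foldl_cons]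
    rcases List.mem_cons.mp hy with rfl | hy
    · split
      · next hm => exact pvDfsFold_mono n path (fun c v s h => pvDfsA_mono n path c v s h) l vis y hm
      · refine pvDfsFold_mono n path (fun c v s h => pvDfsA_mono n path c v s h) l _ y
          (pvDfsA_mono n path y _ y ?_)
        rw [pvMark_insert_true]
        exact Or.inl rfl
    · split
      · exact ihl vis hy
      · exact ihl _ hy

theorem pvDfsA_closed (K : List String) (path : PySem.Dict String (PySem.Set String))
    (hK : ∀ x y, pvN path x y → y ∈ K) :
    ∀ fuel cur vis, pvMu K vis < fuel →
      ∀ s, ¬ pvMark vis s → pvMark (pvDfsA fuel path cur vis) s →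
        ∀ y, pvN path s y → pvMark (pvDfsA fuel path cur vis) y := by
  intro fuel
  induction fuel with
  | zero => intro cur vis h; omega
  | succ n ih =>
    intro cur vis hfuel
    have hmu : pvMu K vis ≤ n := by omega
    have hinv : ∀ (l : List String), (∀ x ∈ l, pvN path cur x) →
        ∀ (v : PySem.Dict String Bool),
        (∀ s, pvMark vis s → pvMark v s) →
        (pvMu K v ≤ pvMu K vis) →
        (∀ s, ¬ pvMark vis s → pvMark v s → ∀ y, pvN path s y → pvMark v y) →
        ((∀ s, pvMark v s → pvMark (l.foldl (fun v st => if v.getD st false then v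
            else pvDfsA n path st (v.insert st true)) v) s) ∧
          pvMu K (l.foldl (fun v st => if v.getD st false then v
            else pvDfsA n path st (v.insert st true)) v) ≤ pvMu K vis ∧
          (∀ s, ¬ pvMark vis s → pvMark (l.foldl (fun v st => if v.getD st false then v
            else pvDfsA n path st (v.insert st true)) v) s →
            ∀ y, pvN path s y → pvMark (l.foldl (fun v st => if v.getD st false then v
            else pvDfsA n path st (v.insert st true)) v) y)) := by
      intro l
      induction l with
      | nil => exact fun _ v h1 h2 h3 => ⟨fun s h => h, h2, h3⟩
      | cons a l ihl =>
        intro h0 v h1 h2 h3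
        simp only [List.foldl_cons]
        by_cases hm : v.getD a false = true
        · rw [if_pos hm]
          exact ihl (fun x hx => h0 x (List.mem_cons_of_mem _ hx)) v h1 h2 h3
        · rw [if_neg hm]
          have hma : ¬ pvMark v a := hm
          have haK : a ∈ K := hK cur a (h0 a List.mem_cons_self)
          have hw_mono : ∀ s, pvMark v s → pvMark (v.insert a true) s := by
            intro s hs; rw [pvMark_insert_true]; exact Or.inr hs
          have hv'_mono : ∀ s, pvMark (v.insert a true) s →
              pvMark (pvDfsA n path a (v.insert a true)) s :=
            fun s hs => pvDfsA_mono n path a _ s hs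
          have hmuw : pvMu K (v.insert a true) < pvMu K v := pvMu_insert_lt K v a haK hma
          have hwn : pvMu K (v.insert a true) < n := by
            have := le_trans h2 hmu; omega
          have hnpos : 0 < n := by omega
          have h1' : ∀ s, pvMark vis s → pvMark (pvDfsA n path a (v.insert a true)) s :=
            fun s hs => hv'_mono s (hw_mono s (h1 s hs))
          have h2' : pvMu K (pvDfsA n path a (v.insert a true)) ≤ pvMu K vis := by
            have := pvMu_mono K (v.insert a true) _ hv'_mono
            omega
          have h3' : ∀ s, ¬ pvMark vis s → pvMark (pvDfsA n path a (v.insert a true)) s →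
              ∀ y, pvN path s y → pvMark (pvDfsA n path a (v.insert a true)) y := by
            intro s hns hs y hy
            by_cases hws : pvMark (v.insert a true) s
            · rw [pvMark_insert_true] at hws
              rcases hws with rfl | hws
              · exact pvDfsA_nbrs n path s (v.insert s true) hnpos y hy
              · exact hv'_mono y (hw_mono y (h3 s hns hws y hy))
            · exact ih a (v.insert a true) hwn s hws hs y hy
          obtain ⟨r1, r2, r3⟩ := ihl (fun x hx => h0 x (List.mem_cons_of_mem _ hx)) _ h1' h2' h3'
          exact ⟨fun s hs => r1 s (hv'_mono s (hw_mono s hs)), r2, r3⟩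
    intro s hns hs y hy
    simp only [pvDfsA] at hs ⊢
    exact (hinv (path.getD cur ([] : PySem.Set String)) (fun x hx => hx) vis
      (fun _ h => h) le_rfl (fun u hnu hu => absurd hu hnu)).2.2 s hns hs y hy

-- the characterisation: DFS from cur over a vis whose marked states (except cur) are closed
theorem pvDfsA_spec (K : List String) (path : PySem.Dict String (PySem.Set String))
    (hK : ∀ x y, pvN path x y → y ∈ K)
    (fuel : Nat) (cur : String) (vis : PySem.Dict String Bool)
    (hfuel : pvMu K vis < fuel) (hcur : pvMark vis cur)
    (hclosed : ∀ s, pvMark vis s → s = cur ∨ ∀ y, pvN path s y → pvMark vis y) :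
    ∀ s, pvMark (pvDfsA fuel path cur vis) s ↔ (pvMark vis s ∨ Relation.ReflTransGen (pvN path) cur s) := by
  have hfpos : 0 < fuel := by have := Nat.zero_le (pvMu K vis); omega
  intro s
  constructor
  · intro h
    refine pvDfsA_sound (fun u => pvMark vis u ∨ Relation.ReflTransGen (pvN path) cur u) path
      ?_ fuel cur vis (fun u hu => Or.inl hu) (Or.inl hcur) s h
    intro a b hPa hab
    rcases hPa with hva | hra
    · rcases hclosed a hva with rfl | hcl
      · exact Or.inr (Relation.ReflTransGen.single hab)
      · exact Or.inl (hcl b hab)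
    · exact Or.inr (hra.tail hab)
  · rintro (hv | hr)
    · exact pvDfsA_mono fuel path cur vis s hv
    · induction hr with
      | refl => exact pvDfsA_mono fuel path cur vis cur hcur
      | @tail b c hab hbc ihr =>
        by_cases hvb : pvMark vis b
        · rcases hclosed b hvb with rfl | hcl
          · exact pvDfsA_nbrs fuel path b vis hfpos c hbc
          · exact pvDfsA_mono fuel path cur vis c (hcl c hbc)
        · exact pvDfsA_closed K path hK fuel cur vis hfuel b hvb ihr c hbc

-- ---- flood (port B) ----
theorem pvSweepFold_mono (l : List (String × String × String)) :
    ∀ (p : PySem.Dict String Bool × Bool) (s : String), pvMark p.1 s →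
      pvMark (l.foldl (fun p tup =>
        if p.1.getD tup.1 false != p.1.getD tup.2.2 false then
          ((p.1.insert tup.1 true).insert tup.2.2 true, true)
        else p) p).1 s := by
  induction l with
  | nil => exact fun p s h => h
  | cons t l ih =>
    intro p s h
    simp only [List.foldl_cons]
    split
    · refine ih _ s ?_
      show pvMark ((p.1.insert t.1 true).insert t.2.2 true) s
      rw [pvMark_insert_true, pvMark_insert_true]
      exact Or.inr (Or.inr h)
    · exact ih p s h

theorem pvSweepB_mono (trans : List (String × String × String)) (v : PySem.Dict String Bool)
    (s : String) (h : pvMark v s) : pvMark (pvSweepB trans v).1 s := by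
  exact pvSweepFold_mono trans (v, false) s h

theorem pvSweepFold_sound (P : String → Prop) (trans : List (String × String × String))
    (hP : ∀ a b, P a → pvAdj trans a b → P b) :
    ∀ (l : List (String × String × String)), (∀ t ∈ l, t ∈ trans) →
      ∀ (p : PySem.Dict String Bool × Bool), (∀ s, pvMark p.1 s → P s) →
      ∀ s, pvMark (l.foldl (fun p tup =>
        if p.1.getD tup.1 false != p.1.getD tup.2.2 false then
          ((p.1.insert tup.1 true).insert tup.2.2 true, true)
        else p) p).1 s → P s := by
  intro l
  induction l with
  | nil => exact fun _ p hp s h => hp s h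
  | cons t l ih =>
    intro hl p hp s h
    simp only [List.foldl_cons] at h
    split at h
    · next hcond =>
      have hne : p.1.getD t.1 false ≠ p.1.getD t.2.2 false := by
        simpa using hcond
      have hadj1 : pvAdj trans t.1 t.2.2 := ⟨t, hl t List.mem_cons_self, Or.inl ⟨rfl, rfl⟩⟩
      have hadj2 : pvAdj trans t.2.2 t.1 := ⟨t, hl t List.mem_cons_self, Or.inr ⟨rfl, rfl⟩⟩
      have hP12 : P t.1 ∧ P t.2.2 := by
        cases hc : p.1.getD t.1 false
        · have hc2 : pvMark p.1 t.2.2 := by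
            unfold pvMark
            cases hc2 : p.1.getD t.2.2 false
            · rw [hc, hc2] at hne; exact absurd rfl hne
            · rfl
          have h2 := hp _ hc2
          exact ⟨hP _ _ h2 hadj2, h2⟩
        · have h1 := hp _ hc
          exact ⟨h1, hP _ _ h1 hadj1⟩
      refine ih (fun u hu => hl u (List.mem_cons_of_mem _ hu)) _ (fun u hu => ?_) s h
      show P u
      have hu' : pvMark ((p.1.insert t.1 true).insert t.2.2 true) u := hu
      rw [pvMark_insert_true, pvMark_insert_true] at hu'
      rcases hu' with rfl | rfl | hu'
      · exact hP12.2
      · exact hP12.1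
      · exact hp u hu'
    · exact ih (fun u hu => hl u (List.mem_cons_of_mem _ hu)) p hp s h

theorem pvSweepB_sound (P : String → Prop) (trans : List (String × String × String))
    (hP : ∀ a b, P a → pvAdj trans a b → P b)
    (v : PySem.Dict String Bool) (hv : ∀ s, pvMark v s → P s) :
    ∀ s, pvMark (pvSweepB trans v).1 s → P s := by
  exact pvSweepFold_sound P trans hP trans (fun t ht => ht) (v, false) hv

theorem pvSweepFold_flagtrue (l : List (String × String × String)) :
    ∀ (v : PySem.Dict String Bool), (l.foldl (fun p tup =>
        if p.1.getD tup.1 false != p.1.getD tup.2.2 false then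
          ((p.1.insert tup.1 true).insert tup.2.2 true, true)
        else p) (v, true)).2 = true := by
  induction l with
  | nil => intro v; rfl
  | cons t l ih =>
    intro v
    simp only [List.foldl_cons]
    split
    · exact ih _
    · exact ih v

theorem pvSweepFold_fix (l : List (String × String × String)) :
    ∀ (v : PySem.Dict String Bool) (b : Bool), (l.foldl (fun p tup =>
        if p.1.getD tup.1 false != p.1.getD tup.2.2 false then
          ((p.1.insert tup.1 true).insert tup.2.2 true, true)
        else p) (v, b)).2 = false →
      (l.foldl (fun p tup =>
        if p.1.getD tup.1 false != p.1.getD tup.2.2 false then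
          ((p.1.insert tup.1 true).insert tup.2.2 true, true)
        else p) (v, b)) = (v, b) ∧ ∀ t ∈ l, v.getD t.1 false = v.getD t.2.2 false := by
  induction l with
  | nil => exact fun v b _ => ⟨rfl, by simp⟩
  | cons t l ih =>
    intro v b h
    simp only [List.foldl_cons] at h ⊢
    split at h
    · rw [pvSweepFold_flagtrue] at h
      cases h
    · next hcond =>
      have heq : v.getD t.1 false = v.getD t.2.2 false := by
        simpa using hcond
      obtain ⟨h1, h2⟩ := ih v b h
      rw [if_neg (by simpa using hcond)]
      refine ⟨h1, fun u hu => ?_⟩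
      rcases List.mem_cons.mp hu with rfl | hu
      · exact heq
      · exact h2 u hu

theorem pvSweepB_fix (trans : List (String × String × String)) (v : PySem.Dict String Bool)
    (h : (pvSweepB trans v).2 = false) :
    (pvSweepB trans v).1 = v ∧ ∀ t ∈ trans, v.getD t.1 false = v.getD t.2.2 false := by
  obtain ⟨h1, h2⟩ := pvSweepFold_fix trans v false h
  exact ⟨by rw [pvSweepB, h1], h2⟩

theorem pvSweepFold_prog (K : List String) :
    ∀ (l : List (String × String × String)), (∀ t ∈ l, t.1 ∈ K ∧ t.2.2 ∈ K) →
      ∀ (v : PySem.Dict String Bool) (b : Bool), (l.foldl (fun p tup =>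
        if p.1.getD tup.1 false != p.1.getD tup.2.2 false then
          ((p.1.insert tup.1 true).insert tup.2.2 true, true)
        else p) (v, b)).2 = true →
      b = true ∨ pvMu K (l.foldl (fun p tup =>
        if p.1.getD tup.1 false != p.1.getD tup.2.2 false then
          ((p.1.insert tup.1 true).insert tup.2.2 true, true)
        else p) (v, b)).1 < pvMu K v := by
  intro l
  induction l with
  | nil => exact fun _ v b h => Or.inl h
  | cons t l ih =>
    intro hl v b h
    simp only [List.foldl_cons] at h ⊢
    by_cases hcond : (v.getD t.1 false != v.getD t.2.2 false) = true
    · rw [if_pos hcond] at h ⊢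
      have hne : v.getD t.1 false ≠ v.getD t.2.2 false := by simpa using hcond
      have hlt : pvMu K ((v.insert t.1 true).insert t.2.2 true) < pvMu K v := by
        cases hc : v.getD t.1 false
        · have hm1 : ¬ pvMark v t.1 := by unfold pvMark; rw [hc]; simp
          have h1 : pvMu K (v.insert t.1 true) < pvMu K v :=
            pvMu_insert_lt K v t.1 (hl t List.mem_cons_self).1 hm1
          have h2 : pvMu K ((v.insert t.1 true).insert t.2.2 true) ≤ pvMu K (v.insert t.1 true) := by
            refine pvMu_mono K _ _ (fun s hs => ?_)
            rw [pvMark_insert_true]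
            exact Or.inr hs
          omega
        · have hc2 : v.getD t.2.2 false = false := by
            cases hc2 : v.getD t.2.2 false
            · rfl
            · rw [hc, hc2] at hne; exact absurd rfl hne
          have hm2 : ¬ pvMark v t.2.2 := by unfold pvMark; rw [hc2]; simp
          have h1 : pvMu K (v.insert t.2.2 true) < pvMu K v :=
            pvMu_insert_lt K v t.2.2 (hl t List.mem_cons_self).2 hm2
          have h2 : pvMu K ((v.insert t.1 true).insert t.2.2 true) ≤ pvMu K (v.insert t.2.2 true) := by
            refine pvMu_mono K _ _ (fun s hs => ?_)
            rw [pvMark_insert_true] at hs ⊢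
            rw [pvMark_insert_true]
            rcases hs with rfl | hs
            · exact Or.inl rfl
            · exact Or.inr (Or.inr hs)
          omega
      have hle : pvMu K (l.foldl (fun p tup =>
          if p.1.getD tup.1 false != p.1.getD tup.2.2 false then
            ((p.1.insert tup.1 true).insert tup.2.2 true, true)
          else p) ((v.insert t.1 true).insert t.2.2 true, true)).1 ≤
          pvMu K ((v.insert t.1 true).insert t.2.2 true) := by
        refine pvMu_mono K _ _ (fun s hs => ?_)
        exact pvSweepFold_mono l _ s hs
      exact Or.inr (by omega)
    · rw [if_neg hcond] at h ⊢
      exact ih (fun u hu => hl u (List.mem_cons_of_mem _ hu)) v b h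

theorem pvSweepB_prog (K : List String) (trans : List (String × String × String))
    (hKt : ∀ t ∈ trans, t.1 ∈ K ∧ t.2.2 ∈ K)
    (v : PySem.Dict String Bool) (h : (pvSweepB trans v).2 = true) :
    pvMu K (pvSweepB trans v).1 < pvMu K v := by
  rcases pvSweepFold_prog K trans hKt v false h with h1 | h1
  · cases h1
  · exact h1

theorem pvFloodB_mono (fuel : Nat) (trans : List (String × String × String))
    (v : PySem.Dict String Bool) (s : String) (h : pvMark v s) :
    pvMark (pvFloodB fuel trans v) s := by
  induction fuel generalizing v with
  | zero => exact h
  | succ n ih =>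
    simp only [pvFloodB]
    split
    · exact ih _ (pvSweepB_mono trans v s h)
    · exact pvSweepB_mono trans v s h

theorem pvFloodB_sound (P : String → Prop) (trans : List (String × String × String))
    (hP : ∀ a b, P a → pvAdj trans a b → P b)
    (fuel : Nat) (v : PySem.Dict String Bool) (hv : ∀ s, pvMark v s → P s) :
    ∀ s, pvMark (pvFloodB fuel trans v) s → P s := by
  induction fuel generalizing v with
  | zero => exact hv
  | succ n ih =>
    simp only [pvFloodB]
    split
    · exact ih _ (fun s hs => pvSweepB_sound P trans hP v hv s hs)
    · exact fun s hs => pvSweepB_sound P trans hP v hv s hs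

theorem pvFloodB_closed (K : List String) (trans : List (String × String × String))
    (hKt : ∀ t ∈ trans, t.1 ∈ K ∧ t.2.2 ∈ K) :
    ∀ fuel v, pvMu K v < fuel →
      ∀ t ∈ trans, (pvFloodB fuel trans v).getD t.1 false = (pvFloodB fuel trans v).getD t.2.2 false := by
  intro fuel
  induction fuel with
  | zero => intro v h; omega
  | succ n ih =>
    intro v hv t ht
    simp only [pvFloodB]
    by_cases hp : (pvSweepB trans v).2 = true
    · rw [if_pos hp]
      have := pvSweepB_prog K trans hKt v hp
      exact ih (pvSweepB trans v).1 (by omega) t ht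
    · rw [if_neg hp]
      obtain ⟨h1, h2⟩ := pvSweepB_fix trans v (by simpa using hp)
      rw [h1]
      exact h2 t ht

theorem pvFloodB_spec (K : List String) (trans : List (String × String × String))
    (hKt : ∀ t ∈ trans, t.1 ∈ K ∧ t.2.2 ∈ K)
    (fuel : Nat) (cur : String) (vis : PySem.Dict String Bool)
    (hfuel : pvMu K vis < fuel) (hcur : pvMark vis cur)
    (hclosed : ∀ s, pvMark vis s → s = cur ∨ ∀ y, pvAdj trans s y → pvMark vis y) :
    ∀ s, pvMark (pvFloodB fuel trans vis) s ↔ (pvMark vis s ∨ Relation.ReflTransGen (pvAdj trans) cur s) := by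
  intro s
  constructor
  · intro h
    refine pvFloodB_sound (fun u => pvMark vis u ∨ Relation.ReflTransGen (pvAdj trans) cur u) trans
      ?_ fuel vis (fun u hu => Or.inl hu) s h
    intro a b hPa hab
    rcases hPa with hva | hra
    · rcases hclosed a hva with rfl | hcl
      · exact Or.inr (Relation.ReflTransGen.single hab)
      · exact Or.inl (hcl b hab)
    · exact Or.inr (hra.tail hab)
  · rintro (hv | hr)
    · exact pvFloodB_mono fuel trans vis s hv
    · have hcl := pvFloodB_closed K trans hKt fuel vis hfuel
      induction hr with
      | refl => exact pvFloodB_mono fuel trans vis cur hcur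
      | @tail b c hab hbc ihr =>
        have hmb := ihr
        obtain ⟨t, ht, hedge⟩ := hbc
        have heq := hcl t ht
        unfold pvMark at hmb ⊢
        rcases hedge with ⟨rfl, rfl⟩ | ⟨rfl, rfl⟩
        · rw [← heq]; exact hmb
        · rw [heq]; exact hmb

-- ---- outer loop: the two component-counting folds agree ----
theorem pvReach_bridge (states : List String) (trans : List (String × String × String)) (x y : String) :
    Relation.ReflTransGen (pvN (pvBuildPath states trans)) x y ↔
      Relation.ReflTransGen (pvAdj trans) x y := by
  constructor
  · exact Relation.ReflTransGen.mono (fun a b h => (pvN_iff_adj states trans a b).mp h)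
  · exact Relation.ReflTransGen.mono (fun a b h => (pvN_iff_adj states trans a b).mpr h)

theorem pvOuter (states : List String) (trans : List (String × String × String))
    (hpre : Pre_has_disjoint_states_py states trans)
    (nA nB : Nat) (hnA : (PySem.Set.ofList states).length ≤ nA)
    (hnB : (PySem.Set.ofList states).length ≤ nB) :
    ∀ (l : List String), (∀ x ∈ l, x ∈ PySem.Set.ofList states) →
    ∀ (cA cB : Int) (vA vB : PySem.Dict String Bool),
      cA = cB →
      (∀ s, pvMark vA s ↔ pvMark vB s) →
      (∀ s, pvMark vA s → ∀ y, pvAdj trans s y → pvMark vA y) →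
      (l.foldl (fun (p : Int × PySem.Dict String Bool) st => if p.2.getD st false then p
        else (p.1 + 1, pvDfsA nA (pvBuildPath states trans) st (p.2.insert st true))) (cA, vA)).1
      = (l.foldl (fun (p : Int × PySem.Dict String Bool) st => if p.2.getD st false then p
        else (p.1 + 1, pvFloodB nB trans (p.2.insert st true))) (cB, vB)).1 := by
  have hKt : ∀ t ∈ trans, t.1 ∈ PySem.Set.ofList states ∧ t.2.2 ∈ PySem.Set.ofList states :=
    fun t ht => ⟨(PySem.Set.mem_ofList _ _).mpr (hpre t ht).1,
      (PySem.Set.mem_ofList _ _).mpr (hpre t ht).2⟩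
  have hKN : ∀ x y, pvN (pvBuildPath states trans) x y → y ∈ PySem.Set.ofList states := by
    intro x y h
    obtain ⟨t, ht, hedge⟩ := (pvN_iff_adj states trans x y).mp h
    rcases hedge with ⟨_, rfl⟩ | ⟨rfl, _⟩
    · exact (hKt t ht).2
    · exact (hKt t ht).1
  intro l
  induction l with
  | nil => intro _ cA cB vA vB hc _ _; exact hc
  | cons a l ih =>
    intro h0 cA cB vA vB hc hiff hcl
    simp only [List.foldl_cons]
    have hb : vA.getD a false = vB.getD a false := Bool.coe_iff_coe.mp (hiff a)
    by_cases hm : vA.getD a false = true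
    · rw [if_pos hm, if_pos (hb ▸ hm)]
      exact ih (fun x hx => h0 x (List.mem_cons_of_mem _ hx)) cA cB vA vB hc hiff hcl
    · rw [if_neg hm, if_neg (hb ▸ hm)]
      have haL : a ∈ PySem.Set.ofList states := h0 a List.mem_cons_self
      have hmarkA : pvMark (vA.insert a true) a := by
        rw [pvMark_insert_true]; exact Or.inl rfl
      have hmarkB : pvMark (vB.insert a true) a := by
        rw [pvMark_insert_true]; exact Or.inl rfl
      have hfA : pvMu (PySem.Set.ofList states) (vA.insert a true) < nA :=
        lt_of_lt_of_le (pvMu_lt_of_mark _ _ a haL hmarkA) hnA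
      have hfB : pvMu (PySem.Set.ofList states) (vB.insert a true) < nB :=
        lt_of_lt_of_le (pvMu_lt_of_mark _ _ a haL hmarkB) hnB
      have hclA : ∀ s, pvMark (vA.insert a true) s →
          s = a ∨ ∀ y, pvN (pvBuildPath states trans) s y → pvMark (vA.insert a true) y := by
        intro s hs
        rw [pvMark_insert_true] at hs
        rcases hs with rfl | hs
        · exact Or.inl rfl
        · refine Or.inr (fun y hy => ?_)
          rw [pvMark_insert_true]
          exact Or.inr (hcl s hs y ((pvN_iff_adj states trans s y).mp hy))
      have hclB : ∀ s, pvMark (vB.insert a true) s →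
          s = a ∨ ∀ y, pvAdj trans s y → pvMark (vB.insert a true) y := by
        intro s hs
        rw [pvMark_insert_true] at hs
        rcases hs with rfl | hs
        · exact Or.inl rfl
        · refine Or.inr (fun y hy => ?_)
          rw [pvMark_insert_true]
          exact Or.inr ((hiff y).mp (hcl s ((hiff s).mpr hs) y hy))
      have specA := pvDfsA_spec (PySem.Set.ofList states) (pvBuildPath states trans) hKN
        nA a (vA.insert a true) hfA hmarkA hclA
      have specB := pvFloodB_spec (PySem.Set.ofList states) trans hKt
        nB a (vB.insert a true) hfB hmarkB hclB
      have hiff' : ∀ s, pvMark (pvDfsA nA (pvBuildPath states trans) a (vA.insert a true)) s ↔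
          pvMark (pvFloodB nB trans (vB.insert a true)) s := by
        intro s
        rw [specA s, specB s, pvMark_insert_true, pvMark_insert_true,
          pvReach_bridge states trans a s]
        rw [hiff s]
      have hcl' : ∀ s, pvMark (pvDfsA nA (pvBuildPath states trans) a (vA.insert a true)) s →
          ∀ y, pvAdj trans s y → pvMark (pvDfsA nA (pvBuildPath states trans) a (vA.insert a true)) y := by
        intro s hs y hy
        rw [specA s, pvMark_insert_true] at hs
        rw [specA y, pvMark_insert_true]
        rcases hs with (rfl | hs) | hs
        · exact Or.inr (Relation.ReflTransGen.single ((pvN_iff_adj states trans s y).mpr hy))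
        · exact Or.inl (Or.inr (hcl s hs y hy))
        · refine Or.inr (hs.tail ((pvN_iff_adj states trans s y).mpr hy))
      exact ih (fun x hx => h0 x (List.mem_cons_of_mem _ hx)) (cA + 1) (cB + 1) _ _
        (by rw [hc]) hiff' hcl'

-- ===== VERDICT (by name: the statement is the Claim_ definition above) =====
theorem has_disjoint_states_py_spec : Claim_equal_has_disjoint_states_py := by
  intro states trans _ hpre
  unfold Spec_has_disjoint_states_py
  simp only [has_disjoint_states_py, has_disjoint_states_py_alt]
  rw [pvBuildPath_keys states trans hpre, pvInitKeys states false]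
  have hlen : (PySem.Set.ofList states).length ≤ states.length :=
    PySem.Set.length_ofList_le states
  have h := pvOuter states trans hpre (PySem.Set.ofList states).length (states.length + 1)
    le_rfl (by omega) (PySem.Set.ofList states) (fun x hx => hx) 0 0
    (states.foldl (fun d s => d.insert s false) PySem.Dict.empty)
    (states.foldl (fun d s => d.insert s false) PySem.Dict.empty)
    rfl (fun s => Iff.rfl)
    (fun s hs => absurd hs (fun h => pvInitFalse states s h))
  rw [h]
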